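-- pv_equiv track=rewrite | github.com/benquick123/code-profiling | code/batch-2/vse-naloge-brez-testov/DN7-M-209.py | brez_sosedov
-- ===== SOURCE A (Python) =====
-- def vsa_polja(s, v):
--     """
--     Generiraj vse koordinate (x, y) za polje s podano širino in višino
--     Args:
--         s (int): širina
--         v (int): višina
--
--     Returns:
--         generator parov polj
--     """
--     return ((x, y) for x in range(s) for y in range(v))
--
-- def sosedov(x,y,mine):
--     return len([(xi, yi) for xi, yi in mine if abs(xi - x) <= 1 and abs(yi - y) <= 1 and not (xi == x and yi == y)])
--
-- def brez_sosedov(mine, s, v):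
--     polja = vsa_polja(s,v)
--     brez_min = set()
--     for x,y in polja:
--         if sosedov(x,y,mine) == 0:
--             brez_min.add((x,y))
--     return brez_min
--     """
--     Vrni množico koordinat polj brez min na sosednjih poljih. Polje samo lahko
--     vsebuje mino.
--
--     Args:
--         mine (set of tuple of int): koordinate min
--         s (int): širina polja
--         v (int): višina polja
--
--     Returns:
--         set of tuple: polja brez min na sosednjih poljih
--     """
-- ===== SOURCE B (Python) =====
-- _OFFSETS = ((-1, -1), (-1, 0), (-1, 1), (0, -1), (0, 1), (1, -1), (1, 0), (1, 1))
--
-- def brez_sosedov(mine, s, v):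
--     blocked = set()
--     for xi, yi in mine:
--         for dx, dy in _OFFSETS:
--             blocked.add((xi + dx, yi + dy))
--     return {(x, y) for x in range(s) for y in range(v) if (x, y) not in blocked}
-- ===== Notes on version B (the rewrite author's own statement) =====
-- stated objective: alternative
-- what changed: Instead of counting mines around every grid cell (a scan of the whole mine list per cell), B marks the 8 neighbors of each mine in a blocked set once and then keeps every grid cell not in that set; intended as faster per-cell work (O(s*v + |mine|) vs O(s*v*|mine|)), measured 2.99x at n=1024, but both time out at the largest size since the output itself has s*v cells.
import Mathlib
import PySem

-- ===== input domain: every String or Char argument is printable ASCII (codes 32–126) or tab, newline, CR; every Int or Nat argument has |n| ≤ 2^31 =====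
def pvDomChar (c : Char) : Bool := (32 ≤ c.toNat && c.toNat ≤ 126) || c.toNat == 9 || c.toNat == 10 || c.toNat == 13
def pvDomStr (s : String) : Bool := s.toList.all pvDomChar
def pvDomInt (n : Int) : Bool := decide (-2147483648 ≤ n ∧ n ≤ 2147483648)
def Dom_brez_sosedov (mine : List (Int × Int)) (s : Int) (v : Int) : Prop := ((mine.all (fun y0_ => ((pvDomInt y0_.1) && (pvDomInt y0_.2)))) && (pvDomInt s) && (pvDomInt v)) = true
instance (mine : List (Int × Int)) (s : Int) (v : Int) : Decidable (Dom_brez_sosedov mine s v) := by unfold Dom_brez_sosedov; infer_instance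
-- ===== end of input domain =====

-- B replaces A's per-cell scan of the mine list by one blocked set built from the mines' 8-neighborhoods (intended as faster; measured 2.99x at n=1024, unconfirmed at larger sizes where the s*v-cell output dominates).
-- ===== PORT A =====
-- sosedov(x, y, mine): number of mines in the 8-neighborhood of (x, y)
def sosedov (x : Int) (y : Int) (mine : List (Int × Int)) : Int :=
  (mine.filter (fun q => decide (|q.1 - x| ≤ 1 ∧ |q.2 - y| ≤ 1 ∧ ¬(q.1 = x ∧ q.2 = y)))).length

-- vsa_polja(s, v): all cells (x, y), x in range(s), y in range(v)
def vsa_polja (s : Int) (v : Int) : List (Int × Int) :=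
  (PySem.List.pyRange 0 s 1).flatMap (fun x => (PySem.List.pyRange 0 v 1).map (fun y => (x, y)))

def brez_sosedov (mine : List (Int × Int)) (s : Int) (v : Int) : List (Int × Int) :=
  (vsa_polja s v).foldl
    (fun brez_min p => if sosedov p.1 p.2 mine = 0 then PySem.Set.add brez_min p else brez_min)
    PySem.Set.empty

-- ===== PORT B =====
def pvOffsets : List (Int × Int) := [(-1, -1), (-1, 0), (-1, 1), (0, -1), (0, 1), (1, -1), (1, 0), (1, 1)]

def pvBlocked (mine : List (Int × Int)) : PySem.Set (Int × Int) :=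
  mine.foldl
    (fun bl p => pvOffsets.foldl (fun bl d => PySem.Set.add bl (p.1 + d.1, p.2 + d.2)) bl)
    PySem.Set.empty

def brez_sosedov_alt (mine : List (Int × Int)) (s : Int) (v : Int) : List (Int × Int) :=
  let blocked := pvBlocked mine
  ((PySem.List.pyRange 0 s 1).flatMap (fun x => (PySem.List.pyRange 0 v 1).map (fun y => (x, y)))).foldl
    (fun acc p => if PySem.Set.contains blocked p then acc else PySem.Set.add acc p)
    PySem.Set.empty

-- ===== PRECONDITION & SPEC =====
def Spec_brez_sosedov (mine : List (Int × Int)) (s : Int) (v : Int) (out : List (Int × Int)) : Prop := out = brez_sosedov_alt mine s v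
instance (mine : List (Int × Int)) (s : Int) (v : Int) (out : List (Int × Int)) : Decidable (Spec_brez_sosedov mine s v out) := by unfold Spec_brez_sosedov; infer_instance

-- ===== CLAIM (what is proved, stated in full; the proofs are below) =====
def Claim_equal_brez_sosedov : Prop := ∀ (mine : List (Int × Int)) (s : Int) (v : Int), Dom_brez_sosedov mine s v → Spec_brez_sosedov mine s v (brez_sosedov mine s v)

-- ===== LEMMAS AND PROOFS =====

-- A's neighbor condition at a cell = the cell is one of that mine's 8 offsets
lemma cond_iff (p : Int × Int) (x y : Int) :
    (|p.1 - x| ≤ 1 ∧ |p.2 - y| ≤ 1 ∧ ¬(p.1 = x ∧ p.2 = y)) ↔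
      ∃ d ∈ pvOffsets, (x, y) = (p.1 + d.1, p.2 + d.2) := by
  rw [abs_le, abs_le]
  constructor
  · rintro ⟨h1, h2, h3⟩
    refine ⟨(x - p.1, y - p.2), ?_, by rw [Prod.ext_iff]; constructor <;> simp⟩
    simp only [pvOffsets, List.mem_cons, List.not_mem_nil, or_false, Prod.mk.injEq]
    omega
  · rintro ⟨d, hd, hxy⟩
    rw [Prod.ext_iff] at hxy
    obtain ⟨hx, hy⟩ := hxy
    simp only [pvOffsets, List.mem_cons, List.not_mem_nil, or_false] at hd
    rcases hd with rfl|rfl|rfl|rfl|rfl|rfl|rfl|rfl <;> simp at hx hy <;> omega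

-- membership in the fold that builds the blocked set
lemma mem_pvBlocked_aux (mine : List (Int × Int)) (bl : PySem.Set (Int × Int)) (q : Int × Int) :
    q ∈ mine.foldl
        (fun bl p => pvOffsets.foldl (fun bl d => PySem.Set.add bl (p.1 + d.1, p.2 + d.2)) bl) bl ↔
      q ∈ bl ∨ ∃ p ∈ mine, ∃ d ∈ pvOffsets, q = (p.1 + d.1, p.2 + d.2) := by
  induction mine generalizing bl with
  | nil => simp
  | cons p ps ih =>
    rw [List.foldl_cons, ih]
    rw [PySem.Set.mem_foldl_add (f := fun d : Int × Int => (p.1 + d.1, p.2 + d.2))]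
    simp only [List.mem_cons]
    aesop

-- membership in the blocked set = some mine has the cell among its 8 offsets
lemma mem_pvBlocked (mine : List (Int × Int)) (q : Int × Int) :
    q ∈ pvBlocked mine ↔ ∃ p ∈ mine, ∃ d ∈ pvOffsets, q = (p.1 + d.1, p.2 + d.2) := by
  unfold pvBlocked
  rw [mem_pvBlocked_aux]
  simp [PySem.Set.empty]

-- A's per-cell count is zero exactly when the cell is outside B's blocked set
lemma sosedov_zero_iff (x y : Int) (mine : List (Int × Int)) :
    sosedov x y mine = 0 ↔ (x, y) ∉ pvBlocked mine := by
  unfold sosedov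
  rw [mem_pvBlocked, Int.natCast_eq_zero, List.length_eq_zero_iff, List.filter_eq_nil_iff]
  simp only [decide_eq_true_eq]
  constructor
  · intro h hex
    obtain ⟨p, hp, hd⟩ := hex
    exact h p hp ((cond_iff p x y).mpr hd)
  · intro h p hp hc
    exact h ⟨p, hp, (cond_iff p x y).mp hc⟩

-- ===== VERDICT (by name: the statement is the Claim_ definition above) =====
theorem brez_sosedov_spec : Claim_equal_brez_sosedov := by
  intro mine s v _
  unfold Spec_brez_sosedov brez_sosedov brez_sosedov_alt vsa_polja
  congr 1
  funext acc p
  by_cases h : p ∈ pvBlocked mine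
  · rw [if_neg (by rw [sosedov_zero_iff]; simpa using h),
      if_pos ((PySem.Set.contains_iff _ _).mpr h)]
  · rw [if_pos (by rw [sosedov_zero_iff]; simpa using h),
      if_neg (fun hc => h ((PySem.Set.contains_iff _ _).mp hc))]
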